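-- pv_equiv track=rewrite | github.com/murilolmartins/challenge_2 | src/genetic_methods.py | check_and_merge_trips
-- ===== SOURCE A (Python) =====
-- def check_and_merge_trips(individual, item_volumes, truck_capacity):
--     """
--     Tenta melhorar uma solução verificando se é possível combinar viagens.
--     """
--     if not individual:
--         return individual
--
--     # Garantir que individual é uma lista
--     if isinstance(individual, dict):
--         individual = list(individual.values())
--
--     # Mapeia os volumes por viagem
--     trip_volumes = {}
--     for item_idx, trip in enumerate(individual):
--         # Garantir que trip é um número
--         try:
--             trip_number = int(trip) if isinstance(
--                 trip, (int, float, str)) else 0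
--             if isinstance(trip, list):
--                 trip_number = 0  # valor padrão para listas
--         except (ValueError, TypeError):
--             trip_number = 0  # valor padrão para conversões inválidas
--
--         if trip_number not in trip_volumes:
--             trip_volumes[trip_number] = 0
--         trip_volumes[trip_number] += item_volumes[item_idx]
--
--     # Tenta combinar viagens parcialmente preenchidas
--     trips = sorted(trip_volumes.keys())
--     improved = True
--     while improved:
--         improved = False
--         for i in range(len(trips)):
--             for j in range(i + 1, len(trips)):
--                 trip1, trip2 = trips[i], trips[j]
--                 # Se as duas viagens juntas não excedem a capacidade
--                 if trip_volumes[trip1] + trip_volumes[trip2] <= truck_capacity: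
--                     # Combina as viagens
--                     for idx in range(len(individual)):
--                         # Garantir que estamos comparando números
--                         current_trip = individual[idx]
--                         if isinstance(current_trip, list):
--                             current_trip = 0
--                         try:
--                             current_trip = int(current_trip)
--                         except (ValueError, TypeError):
--                             current_trip = 0
--
--                         if current_trip == trip2:
--                             individual[idx] = trip1
--                     trip_volumes[trip1] += trip_volumes[trip2]
--                     del trip_volumes[trip2]
--                     trips.remove(trip2)
--                     improved = True
--                     break
--             if improved:
--                 break
--
--     return individual
-- ===== SOURCE B (Python) =====
-- def check_and_merge_trips(individual, item_volumes, truck_capacity):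
--     # Like A, mutates `individual` in place and returns it.
--     # Different algorithm: instead of A's restarting double scan over all pairs
--     # of trips, each round makes ONE right-to-left pass carrying the running
--     # suffix minimum of the trip volumes; the leftmost trip whose volume plus
--     # the suffix minimum fits the capacity is exactly the first member of A's
--     # first mergeable pair, and its partner is found by one forward scan.
--     # Instead of rewriting the individual on every merge, merges are only
--     # RECORDED; the final label of every trip is then resolved by one backward
--     # pass over the merge list and applied to the individual in a single pass.
--     if not individual:
--         return individual
--
--     tv = {}
--     for t, v in zip(individual, item_volumes):
--         tv[t] = tv.get(t, 0) + v
--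
--     trips = sorted(tv)
--     merges = []
--     while True:
--         # right-to-left suffix-minimum pass: leftmost index that can merge
--         i, m = -1, None
--         for k in range(len(trips) - 1, -1, -1):
--             v = tv[trips[k]]
--             if m is not None and v + m <= truck_capacity:
--                 i = k
--             if m is None or v < m:
--                 m = v
--         if i < 0:
--             break
--         t1 = trips[i]
--         j = i + 1
--         while tv[t1] + tv[trips[j]] > truck_capacity:
--             j += 1
--         t2 = trips.pop(j)
--         tv[t1] += tv.pop(t2)
--         merges.append((t2, t1))
--
--     # resolve final labels: later merges decide where earlier targets end up
--     root = {}
--     for t2, t1 in reversed(merges):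
--         root[t2] = root.get(t1, t1)
--
--     individual[:] = [root.get(t, t) for t in individual]
--     return individual
-- ===== Notes on version B (the rewrite author's own statement) =====
-- stated objective: faster
-- what changed: B replaces A's restarting double scan over all trip pairs by one right-to-left pass per round carrying the suffix minimum of the trip volumes (the leftmost trip whose volume plus that minimum fits is exactly the first member of A's first mergeable pair, its partner found by one forward scan), only records the merges, and resolves the final label of every trip by a single backward pass over the merge list applied to the individual once, instead of A's full rewrite of the individual on every merge; intended as faster, measured 2.8x at n=4096 in a timing run.
import Mathlib
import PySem

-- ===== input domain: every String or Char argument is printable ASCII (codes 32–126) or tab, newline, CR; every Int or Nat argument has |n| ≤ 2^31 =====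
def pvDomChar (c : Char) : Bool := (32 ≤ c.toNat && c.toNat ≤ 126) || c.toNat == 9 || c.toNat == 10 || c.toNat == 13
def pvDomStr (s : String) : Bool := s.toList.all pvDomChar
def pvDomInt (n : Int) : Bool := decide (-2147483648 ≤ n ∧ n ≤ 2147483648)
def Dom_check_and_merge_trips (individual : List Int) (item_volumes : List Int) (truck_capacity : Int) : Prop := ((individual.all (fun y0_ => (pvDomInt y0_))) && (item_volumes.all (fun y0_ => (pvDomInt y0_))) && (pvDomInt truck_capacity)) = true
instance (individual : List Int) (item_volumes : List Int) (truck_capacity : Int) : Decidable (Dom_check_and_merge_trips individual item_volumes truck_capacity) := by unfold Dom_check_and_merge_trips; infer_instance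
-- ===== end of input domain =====

-- B finds each merge by one suffix-minimum pass instead of A's double scan over all trip pairs, only
-- RECORDS the merges, and relabels the individual once at the end after resolving final labels by a
-- single backward pass over the merge list (objective: faster; a timing run measured B 2.8x faster at n=4096). Both A and B
-- mutate `individual` in place in Python to the same final contents; the theorems are about the
-- returned value.

-- ===== PORT A =====
-- inner loop 'for j in range(i+1, len(trips))': scan the suffix after trip1 for the first partner that fits
def pvInnerA (truck_capacity : Int) (vol : PySem.Dict Int Int) (trip1 : Int) : List Int → Option Int
  | [] => none
  | u :: us =>
    if vol.getD trip1 0 + vol.getD u 0 ≤ truck_capacity then some u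
    else pvInnerA truck_capacity vol trip1 us

-- outer loop 'for i in range(len(trips))': first pair (trips[i], trips[j]) with i < j whose volumes fit
def pvOuterA (truck_capacity : Int) (vol : PySem.Dict Int Int) : List Int → Option (Int × Int)
  | [] => none
  | t :: rest =>
    match pvInnerA truck_capacity vol t rest with
    | some u => some (t, u)
    | none => pvOuterA truck_capacity vol rest

-- 'while improved:' — each pass that merges removes one element of trips, so trips.length bounds the
-- number of merging passes and the fuel is never exhausted before the pair search returns none.
-- 'trips.remove(trip2)' = List.erase (exact: trip2 is drawn from trips, so it is present).
def pvLoopA (truck_capacity : Int) : Nat → List Int → PySem.Dict Int Int → List Int → List Int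
  | 0, _, _, ind => ind
  | fuel + 1, trips, vol, ind =>
    match pvOuterA truck_capacity vol trips with
    | none => ind
    | some (t1, t2) =>
      pvLoopA truck_capacity fuel (trips.erase t2)
        ((vol.insert t1 (vol.getD t1 0 + vol.getD t2 0)).erase t2)
        (ind.map fun t => if t = t2 then t1 else t)

-- On List Int inputs every isinstance/int() branch of A is the identity (trip_number = trip);
-- item_volumes[item_idx] is ported as pyGetD with default 0, exact under Pre_ (index always in range).
def check_and_merge_trips (individual : List Int) (item_volumes : List Int) (truck_capacity : Int) : List Int :=
  if individual = [] then individual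
  else
    let vol := (PySem.List.enumerate individual).foldl
      (fun d p =>
        let d' := if d.contains p.2 then d else d.insert p.2 0
        d'.insert p.2 (d'.getD p.2 0 + PySem.List.pyGetD item_volumes p.1 0))
      PySem.Dict.empty
    let trips := PySem.List.sorted vol.keys (fun x => x) false
    pvLoopA truck_capacity trips.length trips vol individual

-- ===== PORT B =====
-- Source B's 'for k in range(len(trips)-1, -1, -1)' pass: right-to-left over trips carrying the running
-- suffix minimum m; returns (suffix minimum, leftmost mergeable position as (trips[i], trips[i+1:])).
-- The reversed index loop processes the last element first and the head last, i.e. it is the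
-- structural recursion below (the suffix trips[i+1:] stands for Source B's index i).
def pvScanB (truck_capacity : Int) (vol : PySem.Dict Int Int) : List Int → Option Int × Option (Int × List Int)
  | [] => (none, none)
  | t :: rest =>
    let s := pvScanB truck_capacity vol rest
    let v := vol.getD t 0
    let best := match s.1 with
      | some mv => if v + mv ≤ truck_capacity then some (t, rest) else s.2
      | none => s.2
    let m := match s.1 with
      | some mv => some (if v < mv then v else mv)
      | none => some v
    (m, best)

-- Source B's 'while tv[t1] + tv[trips[j]] > truck_capacity: j += 1': first partner after i that fits
def pvPartnerB (truck_capacity : Int) (vol : PySem.Dict Int Int) (v1 : Int) : List Int → Option Int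
  | [] => none
  | u :: us =>
    if v1 + vol.getD u 0 ≤ truck_capacity then some u
    else pvPartnerB truck_capacity vol v1 us

-- one round's pair selection: suffix-minimum scan, then the forward partner scan
def pvPairB (truck_capacity : Int) (vol : PySem.Dict Int Int) (trips : List Int) : Option (Int × Int) :=
  match (pvScanB truck_capacity vol trips).2 with
  | none => none
  | some (t1, rest) => (pvPartnerB truck_capacity vol (vol.getD t1 0) rest).map (fun u => (t1, u))

-- Source B's 'while True' loop: updates only trips and the volume table and RECORDS each merge
-- ('merges.append((t2, t1))'); 'trips.pop(j)' removes the (unique) occurrence of t2 = List.erase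
def pvLoopB (truck_capacity : Int) : Nat → List Int → PySem.Dict Int Int → List (Int × Int) → List (Int × Int)
  | 0, _, _, ms => ms
  | fuel + 1, trips, vol, ms =>
    match pvPairB truck_capacity vol trips with
    | none => ms
    | some (t1, t2) =>
      pvLoopB truck_capacity fuel (trips.erase t2)
        ((vol.insert t1 (vol.getD t1 0 + vol.getD t2 0)).erase t2)
        (ms ++ [(t2, t1)])

-- Source B's 'for t2, t1 in reversed(merges): root[t2] = root.get(t1, t1)'
def pvRootB (ms : List (Int × Int)) : PySem.Dict Int Int :=
  ms.reverse.foldl (fun r p => r.insert p.1 (r.getD p.2 p.2)) PySem.Dict.empty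

def check_and_merge_trips_alt (individual : List Int) (item_volumes : List Int) (truck_capacity : Int) : List Int :=
  if individual = [] then individual
  else
    let vol := (individual.zip item_volumes).foldl
      (fun d p => d.insert p.1 (d.getD p.1 0 + p.2)) PySem.Dict.empty
    let trips := PySem.List.sorted vol.keys (fun x => x) false
    let root := pvRootB (pvLoopB truck_capacity trips.length trips vol [])
    individual.map fun t => root.getD t t

-- ===== PRECONDITION & SPEC =====
-- Pre_ excludes exactly the inputs where A raises IndexError: a non-empty individual longer than
-- item_volumes (A indexes item_volumes at every position of individual).
def Pre_check_and_merge_trips (individual : List Int) (item_volumes : List Int) (truck_capacity : Int) : Prop :=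
  individual.length ≤ item_volumes.length
instance (individual : List Int) (item_volumes : List Int) (truck_capacity : Int) : Decidable (Pre_check_and_merge_trips individual item_volumes truck_capacity) := by unfold Pre_check_and_merge_trips; infer_instance

def pvWitness_check_and_merge_trips : List Int × List Int × Int := ([1, 2], [3, 4], 10)

def Spec_check_and_merge_trips (individual : List Int) (item_volumes : List Int) (truck_capacity : Int) (out : List Int) : Prop := out = check_and_merge_trips_alt individual item_volumes truck_capacity
instance (individual : List Int) (item_volumes : List Int) (truck_capacity : Int) (out : List Int) : Decidable (Spec_check_and_merge_trips individual item_volumes truck_capacity out) := by unfold Spec_check_and_merge_trips; infer_instance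

-- ===== CLAIM (what is proved, stated in full; the proofs are below) =====
def Claim_equal_check_and_merge_trips : Prop := ∀ (individual : List Int) (item_volumes : List Int) (truck_capacity : Int), Dom_check_and_merge_trips individual item_volumes truck_capacity → Pre_check_and_merge_trips individual item_volumes truck_capacity → Spec_check_and_merge_trips individual item_volumes truck_capacity (check_and_merge_trips individual item_volumes truck_capacity)

-- ===== LEMMAS AND PROOFS =====

-- the suffix minimum computed by B's scan is none exactly on the empty list …
theorem pvScanB_fst_none (c : Int) (vol : PySem.Dict Int Int) (xs : List Int) :
    (pvScanB c vol xs).1 = none ↔ xs = [] := by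
  cases xs with
  | nil => simp [pvScanB]
  | cons t rest =>
    simp only [pvScanB]
    cases (pvScanB c vol rest).1 <;> simp

-- … is a lower bound of the volumes in the list …
theorem pvScanB_fst_le (c : Int) (vol : PySem.Dict Int Int) (xs : List Int) (mv : Int)
    (h : (pvScanB c vol xs).1 = some mv) : ∀ u ∈ xs, mv ≤ vol.getD u 0 := by
  induction xs generalizing mv with
  | nil => simp [pvScanB] at h
  | cons t rest ih =>
    simp only [pvScanB] at h
    cases hm : (pvScanB c vol rest).1 with
    | none =>
      rw [hm] at h
      simp only [Option.some.injEq] at h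
      have : rest = [] := (pvScanB_fst_none c vol rest).mp hm
      subst this
      intro u hu
      simp only [List.mem_singleton] at hu
      subst hu; omega
    | some mv' =>
      rw [hm] at h
      simp only [Option.some.injEq] at h
      intro u hu
      rcases List.mem_cons.mp hu with rfl | hu
      · subst h; split <;> [omega; exact le_trans (by omega) (le_refl _)]
      · have := ih mv' hm u hu
        subst h; split <;> omega

-- … and is attained by some element
theorem pvScanB_fst_mem (c : Int) (vol : PySem.Dict Int Int) (xs : List Int) (mv : Int)
    (h : (pvScanB c vol xs).1 = some mv) : ∃ u ∈ xs, vol.getD u 0 = mv := by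
  induction xs generalizing mv with
  | nil => simp [pvScanB] at h
  | cons t rest ih =>
    simp only [pvScanB] at h
    cases hm : (pvScanB c vol rest).1 with
    | none =>
      rw [hm] at h
      simp only [Option.some.injEq] at h
      exact ⟨t, List.mem_cons_self, h⟩
    | some mv' =>
      rw [hm] at h
      simp only [Option.some.injEq] at h
      by_cases hlt : vol.getD t 0 < mv'
      · exact ⟨t, List.mem_cons_self, by rw [← h]; simp [hlt]⟩
      · obtain ⟨u, hu, hv⟩ := ih mv' hm
        exact ⟨u, List.mem_cons_of_mem _ hu, by rw [← h]; simp [hlt, hv]⟩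

-- A's inner scan finds nothing exactly when no element of the suffix fits
theorem pvInnerA_none_iff (c : Int) (vol : PySem.Dict Int Int) (t1 : Int) (xs : List Int) :
    pvInnerA c vol t1 xs = none ↔ ∀ u ∈ xs, ¬ (vol.getD t1 0 + vol.getD u 0 ≤ c) := by
  induction xs with
  | nil => simp [pvInnerA]
  | cons u us ih =>
    simp only [pvInnerA]
    by_cases hf : vol.getD t1 0 + vol.getD u 0 ≤ c
    · simp [hf]
    · simp [hf, ih]
      intro _
      omega

-- B's partner scan is A's inner scan with the first volume precomputed
theorem pvPartnerB_eq_inner (c : Int) (vol : PySem.Dict Int Int) (t1 : Int) (xs : List Int) :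
    pvPartnerB c vol (vol.getD t1 0) xs = pvInnerA c vol t1 xs := by
  induction xs with
  | nil => rfl
  | cons u us ih => simp [pvPartnerB, pvInnerA, ih]

-- KEY LEMMA: B's suffix-minimum selection picks exactly A's first mergeable pair
theorem pvPairB_eq (c : Int) (vol : PySem.Dict Int Int) (xs : List Int) :
    pvPairB c vol xs = pvOuterA c vol xs := by
  induction xs with
  | nil => rfl
  | cons t rest ih =>
    simp only [pvPairB, pvScanB, pvOuterA]
    cases hm : (pvScanB c vol rest).1 with
    | none =>
      have hrest : rest = [] := (pvScanB_fst_none c vol rest).mp hm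
      subst hrest
      simp [pvScanB, pvInnerA, pvOuterA]
    | some mv =>
      by_cases hfit : vol.getD t 0 + mv ≤ c
      · simp only [hfit, if_true]
        have hinner : pvInnerA c vol t rest ≠ none := by
          intro hnone
          obtain ⟨u, hu, hv⟩ := pvScanB_fst_mem c vol rest mv hm
          exact (pvInnerA_none_iff c vol t rest).mp hnone u hu (by omega)
        cases hi : pvInnerA c vol t rest with
        | none => exact absurd hi hinner
        | some u => simp [pvPartnerB_eq_inner, hi]
      · simp only [hfit, if_false]
        have hinner : pvInnerA c vol t rest = none := by
          rw [pvInnerA_none_iff]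
          intro u hu
          have := pvScanB_fst_le c vol rest mv hm u hu
          omega
        rw [hinner]
        simpa [pvPairB] using ih

-- applying the recorded substitutions in chronological order (what A does to the individual)
def pvApply : List (Int × Int) → Int → Int
  | [], t => t
  | p :: rest, t => pvApply rest (if t = p.1 then p.2 else t)

-- recording one more merge = applying its substitution after the earlier ones
theorem pvApply_append (ms : List (Int × Int)) (q : Int × Int) (t : Int) :
    pvApply (ms ++ [q]) t = if pvApply ms t = q.1 then q.2 else pvApply ms t := by
  induction ms generalizing t with
  | nil => simp [pvApply]
  | cons p rest ih => simp [pvApply, ih]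

-- KEY LEMMA: the single backward pass over the merge list resolves every trip to exactly the
-- label that applying all substitutions in chronological order would give it
theorem pvRootB_getD (ms : List (Int × Int)) : ∀ t : Int, (pvRootB ms).getD t t = pvApply ms t := by
  induction ms with
  | nil => intro t; simp [pvRootB, pvApply, PySem.Dict.empty, PySem.Dict.getD, PySem.Dict.get?]
  | cons p rest ih =>
    intro t
    have hroot : pvRootB (p :: rest)
        = (pvRootB rest).insert p.1 ((pvRootB rest).getD p.2 p.2) := by
      simp [pvRootB, List.foldl_append]
    by_cases h : t = p.1
    · subst h
      rw [hroot, PySem.Dict.getD_insert_self, ih]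
      simp [pvApply]
    · rw [hroot]
      simp only [pvApply, if_neg h]
      rw [PySem.Dict.getD_insert_of_ne _ _ _ h, ih]

-- MAIN INVARIANT: A's incrementally-relabelled list is the image of the original list under the
-- substitutions B records; both loops make the same merge at every step (pvPairB_eq).
theorem pvLoop_eq (c : Int) : ∀ (fuel : Nat) (trips : List Int) (vol : PySem.Dict Int Int)
    (ms : List (Int × Int)) (xs : List Int),
    pvLoopA c fuel trips vol (xs.map (pvApply ms))
      = xs.map (pvApply (pvLoopB c fuel trips vol ms)) := by
  intro fuel
  induction fuel with
  | zero => intro trips vol ms xs; rfl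
  | succ fuel ih =>
    intro trips vol ms xs
    cases ho : pvOuterA c vol trips with
    | none => simp [pvLoopA, pvLoopB, pvPairB_eq, ho]
    | some pr =>
      obtain ⟨t1, t2⟩ := pr
      simp only [pvLoopA, pvLoopB, pvPairB_eq, ho]
      have hmap : (xs.map (pvApply ms)).map (fun t => if t = t2 then t1 else t)
          = xs.map (pvApply (ms ++ [(t2, t1)])) := by
        rw [List.map_map]
        apply List.map_congr_left
        intro t _
        simp [Function.comp, pvApply_append]
      rw [hmap]
      exact ih _ _ _ _

-- the two volume tables agree: A's enumerate+index fold is B's zip fold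
theorem pvVol_eq (individual item_volumes : List Int)
    (h : individual.length ≤ item_volumes.length) :
    (PySem.List.enumerate individual).foldl
      (fun d p =>
        let d' := if d.contains p.2 then d else d.insert p.2 0
        d'.insert p.2 (d'.getD p.2 0 + PySem.List.pyGetD item_volumes p.1 0))
      PySem.Dict.empty
    = (individual.zip item_volumes).foldl
        (fun d p => d.insert p.1 (d.getD p.1 0 + p.2)) PySem.Dict.empty := by
  have hstep : ∀ (d : PySem.Dict Int Int) (p : Int × Int),
      (let d' := if d.contains p.2 then d else d.insert p.2 0
       d'.insert p.2 (d'.getD p.2 0 + PySem.List.pyGetD item_volumes p.1 0))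
      = d.insert p.2 (d.getD p.2 0 + PySem.List.pyGetD item_volumes p.1 0) := by
    intro d p
    by_cases hc : d.contains p.2
    · simp [hc]
    · simp only [hc, if_false, Bool.false_eq_true]
      rw [PySem.Dict.getD_insert_self, PySem.Dict.insert_insert_self,
        PySem.Dict.getD_of_not_contains d _ (by simpa using hc)]
  have henum : (PySem.List.enumerate individual).map
      (fun p => (p.2, PySem.List.pyGetD item_volumes p.1 0)) = individual.zip item_volumes := by
    apply List.ext_getElem
    · simp [PySem.List.length_enumerate, Nat.min_eq_left h]
    · intro k hk1 hk2
      have hk : k < individual.length := by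
        simpa [PySem.List.length_enumerate] using hk1
      simp [PySem.List.getElem_enumerate, PySem.List.pyGetD_natCast,
        List.getElem_zip, List.getElem?_eq_getElem (Nat.lt_of_lt_of_le hk h)]
  calc (PySem.List.enumerate individual).foldl
        (fun d p =>
          let d' := if d.contains p.2 then d else d.insert p.2 0
          d'.insert p.2 (d'.getD p.2 0 + PySem.List.pyGetD item_volumes p.1 0))
        PySem.Dict.empty
      = (PySem.List.enumerate individual).foldl
        (fun d p => d.insert p.2 (d.getD p.2 0 + PySem.List.pyGetD item_volumes p.1 0))
        PySem.Dict.empty := by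
        have hf : (fun (d : PySem.Dict Int Int) (p : Int × Int) =>
            let d' := if d.contains p.2 then d else d.insert p.2 0
            d'.insert p.2 (d'.getD p.2 0 + PySem.List.pyGetD item_volumes p.1 0))
          = fun d p => d.insert p.2 (d.getD p.2 0 + PySem.List.pyGetD item_volumes p.1 0) := by
          funext d p; exact hstep d p
        rw [hf]
    _ = ((PySem.List.enumerate individual).map
          (fun p => (p.2, PySem.List.pyGetD item_volumes p.1 0))).foldl
        (fun d p => d.insert p.1 (d.getD p.1 0 + p.2)) PySem.Dict.empty := by
        rw [List.foldl_map]
    _ = (individual.zip item_volumes).foldl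
        (fun d p => d.insert p.1 (d.getD p.1 0 + p.2)) PySem.Dict.empty := by rw [henum]

-- ===== VERDICT (by name: the statement is the Claim_ definition above) =====
theorem check_and_merge_trips_spec : Claim_equal_check_and_merge_trips := by
  intro individual item_volumes truck_capacity _ hpre
  unfold Spec_check_and_merge_trips check_and_merge_trips check_and_merge_trips_alt
  by_cases hnil : individual = []
  · simp [hnil]
  · simp only [hnil, if_false]
    rw [pvVol_eq individual item_volumes hpre]
    set vol := (individual.zip item_volumes).foldl
      (fun d p => d.insert p.1 (d.getD p.1 0 + p.2)) PySem.Dict.empty with hvol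
    set trips := PySem.List.sorted vol.keys (fun x => x) false with htrips
    have hid : individual = individual.map (pvApply []) := by
      simp [pvApply]
    conv_lhs => rw [hid]
    rw [pvLoop_eq]
    apply List.map_congr_left
    intro t _
    exact (pvRootB_getD _ t).symm
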